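-- pv_equiv track=rewrite | github.com/nebg-ship/190Group-Analytics-Dashboard | qb_sync_service/service.py | _infer_account_type_for_missing_ref
-- ===== SOURCE A (Python) =====
-- from typing import Any
--
-- def _optional_text(value: Any) -> str:
--     return str(value or "").strip()
--
-- def _normalize_account_full_name_for_compare(value: str) -> str:
--     segments = [segment.strip() for segment in str(value or "").split(":") if segment.strip()]
--     if not segments:
--         return ""
--     return ":".join(segments)
--
-- def _normalize_account_key(value: str) -> str:
--     return _normalize_account_full_name_for_compare(value).casefold()
--
-- def _account_path_prefixes(value: str) -> list[str]:
--     clean = _normalize_account_full_name_for_compare(value)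
--     if not clean:
--         return []
--     parts = clean.split(":")
--     prefixes: list[str] = []
--     for index in range(len(parts)):
--         prefixes.append(":".join(parts[: index + 1]))
--     return prefixes
--
-- def _infer_account_type_for_missing_ref(
--     missing_account_full_name: str,
--     create_spec: dict[str, Any],
-- ) -> str | None:
--     missing_key = _normalize_account_key(missing_account_full_name)
--     if not missing_key:
--         return None
--
--     account_sources = (
--         ("incomeAccountFullName", "Income"),
--         ("cogsAccountFullName", "CostOfGoodsSold"),
--         ("assetAccountFullName", "OtherCurrentAsset"),
--     )
--     for field_name, account_type in account_sources:
--         source_full_name = _optional_text(create_spec.get(field_name))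
--         if not source_full_name:
--             continue
--         source_prefixes = {_normalize_account_key(prefix) for prefix in _account_path_prefixes(source_full_name)}
--         if missing_key in source_prefixes:
--             return account_type
--
--     if missing_key.startswith("cog"):
--         return "CostOfGoodsSold"
--     if "inventory asset" in missing_key or missing_key.endswith("asset"):
--         return "OtherCurrentAsset"
--     return "Income"
-- ===== SOURCE B (Python) =====
-- def _key_segments(value):
--     return [seg.strip().casefold() for seg in str(value or "").split(":") if seg.strip()]
--
-- def _infer_account_type_for_missing_ref(missing_account_full_name, create_spec):
--     missing_segments = _key_segments(missing_account_full_name)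
--     if not missing_segments:
--         return None
--     for field_name, account_type in (
--         ("incomeAccountFullName", "Income"),
--         ("cogsAccountFullName", "CostOfGoodsSold"),
--         ("assetAccountFullName", "OtherCurrentAsset"),
--     ):
--         source_segments = _key_segments(create_spec.get(field_name))
--         if source_segments[: len(missing_segments)] == missing_segments:
--             return account_type
--     missing_key = ":".join(missing_segments)
--     if missing_key.startswith("cog"):
--         return "CostOfGoodsSold"
--     if "inventory asset" in missing_key or missing_key.endswith("asset"):
--         return "OtherCurrentAsset"
--     return "Income"
-- ===== Notes on version B (the rewrite author's own statement) =====
-- stated objective: simpler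
-- what changed: B drops _account_path_prefixes and the per-source set of all normalized path prefixes entirely: it splits each name once into casefolded segment lists and tests directly whether the source's segment list starts with the missing name's segment list (source_segments[:len(missing_segments)] == missing_segments), keeping the three-source loop and the trailing heuristics.
import Mathlib
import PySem

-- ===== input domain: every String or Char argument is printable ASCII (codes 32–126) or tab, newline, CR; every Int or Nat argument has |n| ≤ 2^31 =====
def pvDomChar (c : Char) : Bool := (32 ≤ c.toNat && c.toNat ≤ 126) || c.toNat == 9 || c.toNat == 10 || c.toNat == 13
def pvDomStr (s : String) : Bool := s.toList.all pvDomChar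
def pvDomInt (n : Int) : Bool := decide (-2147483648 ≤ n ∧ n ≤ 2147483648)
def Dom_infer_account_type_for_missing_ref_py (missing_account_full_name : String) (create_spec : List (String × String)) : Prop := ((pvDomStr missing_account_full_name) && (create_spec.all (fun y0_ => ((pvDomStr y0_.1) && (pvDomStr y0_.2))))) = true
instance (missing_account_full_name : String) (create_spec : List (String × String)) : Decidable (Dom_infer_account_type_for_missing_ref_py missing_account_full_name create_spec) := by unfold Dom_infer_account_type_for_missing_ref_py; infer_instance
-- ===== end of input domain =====

-- B replaces A's per-source set of all normalized path prefixes by a direct segment-list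
-- prefix comparison (source_segments[:len(missing_segments)] == missing_segments); return value only.

-- ===== PORT A =====
-- _optional_text(value): str(value or "").strip(); on a str argument 'value or ""' is the string itself
def pvOptionalText (value : String) : String := PySem.Str.strip value

-- _normalize_account_full_name_for_compare; ':' ≠ "" so Str.split? is `some` and .getD [] is exact
def pvNormalize (value : String) : String :=
  let segments := (((PySem.Str.split? value ":").getD []).filter
      (fun segment => PySem.Str.strip segment != "")).map PySem.Str.strip
  if segments = [] then "" else PySem.Str.join ":" segments

-- _normalize_account_key; str.casefold = Str.lower, exact on the ASCII input domain
def pvKey (value : String) : String := PySem.Str.lower (pvNormalize value)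

-- _account_path_prefixes
def pvPathPrefixes (value : String) : List String :=
  let clean := pvNormalize value
  if clean = "" then []
  else
    let parts := (PySem.Str.split? clean ":").getD []
    (PySem.List.pyRange 0 (parts.length : Int) 1).foldl
      (fun prefixes index =>
        prefixes ++ [PySem.Str.join ":" (PySem.List.slice parts none (some (index + 1)))]) []

-- the for-loop over account_sources with its early return
def pvLoopA (missing_key : String) (d : PySem.Dict String String) :
    List (String × String) → Option String
  | [] => none
  | (field_name, account_type) :: rest =>
    let source_full_name := pvOptionalText (d.getD field_name "")
    if source_full_name = "" then pvLoopA missing_key d rest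
    else
      let source_prefixes := PySem.Set.ofList ((pvPathPrefixes source_full_name).map pvKey)
      if PySem.Set.contains source_prefixes missing_key then some account_type
      else pvLoopA missing_key d rest

def infer_account_type_for_missing_ref_py (missing_account_full_name : String) (create_spec : List (String × String)) : Option String :=
  let missing_key := pvKey missing_account_full_name
  if missing_key = "" then none
  else
    match pvLoopA missing_key (PySem.Dict.mk create_spec)
        [("incomeAccountFullName", "Income"), ("cogsAccountFullName", "CostOfGoodsSold"),
         ("assetAccountFullName", "OtherCurrentAsset")] with
    | some account_type => some account_type
    | none =>
      if PySem.Str.startswith missing_key "cog" then some "CostOfGoodsSold"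
      else if PySem.Str.isIn "inventory asset" missing_key
          || PySem.Str.endswith missing_key "asset" then some "OtherCurrentAsset"
      else some "Income"

-- ===== PORT B =====
-- _key_segments: [seg.strip().casefold() for seg in str(value or "").split(":") if seg.strip()]
def pvKeySegments (value : String) : List String :=
  (((PySem.Str.split? value ":").getD []).filter
      (fun segment => PySem.Str.strip segment != "")).map
    (fun segment => PySem.Str.lower (PySem.Str.strip segment))

def pvLoopB (missing_segments : List String) (d : PySem.Dict String String) :
    List (String × String) → Option String
  | [] => none
  | (field_name, account_type) :: rest =>
    let source_text := PySem.Str.strip (d.getD field_name "")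
    let source_segments := pvKeySegments source_text
    if PySem.List.slice source_segments none (some (missing_segments.length : Int))
        == missing_segments then some account_type
    else pvLoopB missing_segments d rest

def infer_account_type_for_missing_ref_py_alt (missing_account_full_name : String) (create_spec : List (String × String)) : Option String :=
  let missing_segments := pvKeySegments missing_account_full_name
  if missing_segments = [] then none
  else
    match pvLoopB missing_segments (PySem.Dict.mk create_spec)
        [("incomeAccountFullName", "Income"), ("cogsAccountFullName", "CostOfGoodsSold"),
         ("assetAccountFullName", "OtherCurrentAsset")] with
    | some account_type => some account_type
    | none =>
      let missing_key := PySem.Str.join ":" missing_segments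
      if PySem.Str.startswith missing_key "cog" then some "CostOfGoodsSold"
      else if PySem.Str.isIn "inventory asset" missing_key
          || PySem.Str.endswith missing_key "asset" then some "OtherCurrentAsset"
      else some "Income"

-- ===== PRECONDITION & SPEC =====
def Spec_infer_account_type_for_missing_ref_py (missing_account_full_name : String) (create_spec : List (String × String)) (out : Option String) : Prop := out = infer_account_type_for_missing_ref_py_alt missing_account_full_name create_spec
instance (missing_account_full_name : String) (create_spec : List (String × String)) (out : Option String) : Decidable (Spec_infer_account_type_for_missing_ref_py missing_account_full_name create_spec out) := by unfold Spec_infer_account_type_for_missing_ref_py; infer_instance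

-- ===== CLAIM (what is proved, stated in full; the proofs are below) =====
def Claim_equal_infer_account_type_for_missing_ref_py : Prop := ∀ (missing_account_full_name : String) (create_spec : List (String × String)), Dom_infer_account_type_for_missing_ref_py missing_account_full_name create_spec → Spec_infer_account_type_for_missing_ref_py missing_account_full_name create_spec (infer_account_type_for_missing_ref_py missing_account_full_name create_spec)

-- ===== LEMMAS AND PROOFS =====

-- proof-only helpers: the common "good segment" shape and the shared split/strip/filter core
def pvGood (s : String) : Prop := s.toList ≠ [] ∧ ':' ∉ s.toList ∧ PySem.Str.strip s = s

def pvSegs (value : String) : List String :=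
  (((PySem.Str.split? value ":").getD []).filter
      (fun segment => PySem.Str.strip segment != "")).map PySem.Str.strip

theorem pvSplitOnGo_eq (c : Char) : ∀ (fuel : Nat) (l cur : List Char) (acc : List (List Char)), l.length < fuel →
    PySem.Chars.splitOn.go [c] fuel l cur acc
      = acc.reverse ++ (l.splitOn c).modifyHead (cur.reverse ++ ·) := by
  intro fuel
  induction fuel with
  | zero => omega
  | succ fuel ih =>
    intro l cur acc hl
    cases l with
    | nil => simp [PySem.Chars.splitOn.go, List.splitOn, List.splitOnP_nil]
    | cons x rest =>
      rw [PySem.Chars.splitOn.go]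
      by_cases hx : x = c
      · have hp : [c].isPrefixOf (x :: rest) = true := by simp [List.isPrefixOf, hx]
        simp only [hp, if_pos]
        rw [ih _ _ _ (by simp at hl ⊢; omega)]
        simp [List.splitOn, List.splitOnP_cons, hx]
        cases List.splitOnP (fun x => x == c) rest <;> simp
      · have hp : [c].isPrefixOf (x :: rest) = false := by simp [List.isPrefixOf]; exact fun h => absurd h.symm hx
        simp only [hp, Bool.false_eq_true, if_false]
        rw [ih _ _ _ (by simp at hl ⊢; omega)]
        have : (x == c) = false := by simp [hx]
        simp [List.splitOn, List.splitOnP_cons, this, List.modifyHead_modifyHead, Function.comp_def]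

theorem pvSplitOn_eq (cs : List Char) (c : Char) :
    PySem.Chars.splitOn cs [c] = cs.splitOn c := by
  rw [PySem.Chars.splitOn, pvSplitOnGo_eq c _ _ _ _ (by omega)]
  cases List.splitOn c cs <;> simp

theorem pvNotMem_of_mem_splitOn (c : Char) (cs : List Char) :
    ∀ p ∈ cs.splitOn c, c ∉ p := by
  induction cs with
  | nil => simp [List.splitOn, List.splitOnP_nil]
  | cons x rest ih =>
    intro p hp
    rw [List.splitOn, List.splitOnP_cons] at hp
    by_cases hx : x = c
    · simp [hx] at hp
      rcases hp with h | h
      · simp [h]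
      · exact ih p (by rwa [List.splitOn])
    · have : (x == c) = false := by simp [hx]
      simp [this] at hp
      rcases h' : List.splitOnP (fun x => x == c) rest with _ | ⟨a, l⟩
      · rw [h'] at hp; simp at hp
      · rw [h'] at hp
        simp at hp
        rcases hp with h | h
        · subst h
          have ha : c ∉ a := ih a (by rw [List.splitOn, h']; simp)
          simp [ha]; exact fun hc => absurd hc.symm hx
        · exact ih p (by rw [List.splitOn, h']; simp [h])

theorem pvMem_strip {x : Char} {l : List Char} (h : x ∈ PySem.Chars.strip l) : x ∈ l := by
  simp [PySem.Chars.strip, PySem.Chars.rstrip, PySem.Chars.lstrip] at h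
  have h1 := (List.dropWhile_sublist (l := (List.dropWhile PySem.Chars.isspace l).reverse) PySem.Chars.isspace).mem h
  simp at h1
  exact (List.dropWhile_sublist _).mem h1

theorem pvLowerChar_eq_colon_iff (c : Char) : PySem.Chars.lowerChar c = ':' ↔ c = ':' := by
  constructor
  · intro h
    rw [PySem.Chars.lowerChar] at h
    split_ifs at h with hu
    · exfalso
      simp [PySem.Chars.isupper] at hu
      have h65 : ('A' : Char).toNat ≤ c.toNat := Fin.mk_le_mk.mp hu.1
      have h90 : c.toNat ≤ ('Z' : Char).toNat := Fin.mk_le_mk.mp hu.2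
      have hA : ('A' : Char).toNat = 65 := by decide
      have hZ : ('Z' : Char).toNat = 90 := by decide
      have h2 : (Char.ofNat (c.toNat + 32)).toNat = (':' : Char).toNat := by rw [h]
      rw [Char.toNat_ofNat] at h2
      have hv : (c.toNat + 32).isValidChar := Or.inl (by omega)
      rw [if_pos hv] at h2
      have hc : (':' : Char).toNat = 58 := by decide
      omega
    · exact h
  · intro h; subst h; decide

theorem head_dropWhile (p : α → Bool) (l : List α) (x : α) (xs : List α)
    (h : List.dropWhile p l = x :: xs) : p x = false := by
  induction l with
  | nil => simp at h
  | cons a as ih =>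
    rw [List.dropWhile_cons] at h
    split_ifs at h with ha
    · exact ih h
    · cases h; simpa using ha

theorem dropWhile_eq_self_of_head (p : α → Bool) (l : List α)
    (h : ∀ x xs, l = x :: xs → p x = false) : List.dropWhile p l = l := by
  cases l with
  | nil => simp
  | cons a as => rw [List.dropWhile_cons, h a as rfl]; simp

theorem pvLstrip_strip (l : List Char) :
    PySem.Chars.lstrip (PySem.Chars.strip l) = PySem.Chars.strip l := by
  rw [PySem.Chars.strip, PySem.Chars.lstrip]
  apply dropWhile_eq_self_of_head
  intro x xs h
  -- rstrip (lstrip l) = x :: xs ; it's a prefix of lstrip l, so lstrip l = x :: …, head fails isspace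
  have hpre : PySem.Chars.rstrip (PySem.Chars.lstrip l) <+: PySem.Chars.lstrip l := by
    rw [PySem.Chars.rstrip]
    have := List.reverse_prefix.mpr (List.dropWhile_suffix (l := (PySem.Chars.lstrip l).reverse) PySem.Chars.isspace)
    simpa using this
  rw [h] at hpre
  obtain ⟨t, ht⟩ := hpre
  exact head_dropWhile PySem.Chars.isspace l x (xs ++ t)
    (by rw [show List.dropWhile PySem.Chars.isspace l = PySem.Chars.lstrip l from rfl, ← ht]; simp)

theorem pvRstrip_rstrip (l : List Char) :
    PySem.Chars.rstrip (PySem.Chars.rstrip l) = PySem.Chars.rstrip l := by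
  simp [PySem.Chars.rstrip, List.dropWhile_idempotent]

theorem pvStrip_strip (l : List Char) :
    PySem.Chars.strip (PySem.Chars.strip l) = PySem.Chars.strip l := by
  conv_lhs => rw [PySem.Chars.strip, pvLstrip_strip]
  rw [show PySem.Chars.strip l = PySem.Chars.rstrip (PySem.Chars.lstrip l) from rfl, pvRstrip_rstrip]

theorem map_intersperse' (f : α → β) (sep : α) (L : List α) :
    (L.intersperse sep).map f = (L.map f).intersperse (f sep) := by
  induction L with
  | nil => simp
  | cons a l ih =>
    cases l with
    | nil => simp
    | cons b m => simp [List.intersperse_cons₂] at ih ⊢; exact ih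

theorem pvLower_join (L : List String) :
    PySem.Str.lower (PySem.Str.join ":" L) = PySem.Str.join ":" (L.map PySem.Str.lower) := by
  apply String.toList_inj.mp
  simp only [PySem.Str.lower, PySem.Str.join, PySem.Chars.join, PySem.Chars.lower,
    String.toList_ofList, List.intercalate, List.map_flatten, map_intersperse', List.map_map,
    Function.comp_def]
  rfl

theorem pvSplit_getD (value : String) :
    (PySem.Str.split? value ":").getD []
      = (value.toList.splitOn ':').map String.ofList := by
  have : (":" : String).toList = [':'] := rfl
  simp [PySem.Str.split?, PySem.Chars.split?, this, pvSplitOn_eq]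

theorem pvSegs_good (value : String) : ∀ s ∈ pvSegs value, pvGood s := by
  intro s hs
  rw [pvSegs, pvSplit_getD] at hs
  obtain ⟨p, hpf, rfl⟩ := List.mem_map.mp hs
  have hp := (List.mem_filter.mp hpf).1
  have hne := (List.mem_filter.mp hpf).2
  obtain ⟨piece, hpiece, rfl⟩ := List.mem_map.mp hp
  have hstl : (PySem.Str.strip (String.ofList piece)).toList = PySem.Chars.strip piece := by
    simp [PySem.Str.strip, String.toList_ofList]
  refine ⟨?_, ?_, ?_⟩
  · intro h0
    have : PySem.Str.strip (String.ofList piece) = "" := String.toList_inj.mp (by rw [h0]; rfl)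
    simp [this] at hne
  · rw [hstl]
    intro hc
    exact pvNotMem_of_mem_splitOn ':' value.toList piece hpiece (pvMem_strip hc)
  · apply String.toList_inj.mp
    simp [PySem.Str.strip, String.toList_ofList, pvStrip_strip]

theorem pvKeySegments_eq (value : String) :
    pvKeySegments value = (pvSegs value).map PySem.Str.lower := by
  simp [pvKeySegments, pvSegs, List.map_map, Function.comp_def]

theorem pvNormalize_eq_join (value : String) (h : pvSegs value ≠ []) :
    pvNormalize value = PySem.Str.join ":" (pvSegs value) := by
  rw [show pvNormalize value
      = if pvSegs value = [] then "" else PySem.Str.join ":" (pvSegs value) from rfl, if_neg h]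

theorem pvNormalize_eq_empty (value : String) (h : pvSegs value = []) :
    pvNormalize value = "" := by
  rw [show pvNormalize value
      = if pvSegs value = [] then "" else PySem.Str.join ":" (pvSegs value) from rfl, if_pos h]

theorem pvToList_join (L : List String) :
    (PySem.Str.join ":" L).toList = [':'].intercalate (L.map String.toList) := by
  simp [PySem.Str.join, PySem.Chars.join, String.toList_ofList]

theorem pvJoin_ne_empty (L : List String) (hL : L ≠ [])
    (hg : ∀ s ∈ L, s.toList ≠ []) : PySem.Str.join ":" L ≠ "" := by
  intro h
  have h' : PySem.Chars.join [':'] (L.map String.toList) = [] := by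
    have : (PySem.Str.join ":" L).toList = PySem.Chars.join [':'] (L.map String.toList) := by
      simp [PySem.Str.join, String.toList_ofList]
    rw [← this, h]
    rfl
  cases L with
  | nil => exact hL rfl
  | cons a as =>
    cases as with
    | nil =>
      rw [show (([a] : List String).map String.toList) = [a.toList] from rfl, PySem.Chars.join_singleton] at h'
      exact hg a (by simp) h'
    | cons b bs =>
      rw [show ((a :: b :: bs).map String.toList) = a.toList :: b.toList :: (bs.map String.toList) from rfl,
        PySem.Chars.join_cons_cons] at h'
      simp at h'

theorem pvSplit_join (L : List String) (hL : L ≠ [])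
    (hg : ∀ s ∈ L, s.toList ≠ [] ∧ ':' ∉ s.toList) :
    (PySem.Str.split? (PySem.Str.join ":" L) ":").getD [] = L := by
  rw [pvSplit_getD, pvToList_join]
  rw [List.splitOn_intercalate _ ':' (by intro l hl; obtain ⟨s, hs, rfl⟩ := List.mem_map.mp hl; exact (hg s hs).2) (by simpa using hL)]
  simp [List.map_map, Function.comp_def, String.ofList_toList]

theorem pvJoin_inj (L1 L2 : List String) (h1 : ∀ s ∈ L1, s.toList ≠ [] ∧ ':' ∉ s.toList)
    (h2 : ∀ s ∈ L2, s.toList ≠ [] ∧ ':' ∉ s.toList) (hn1 : L1 ≠ []) (hn2 : L2 ≠ [])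
    (h : PySem.Str.join ":" L1 = PySem.Str.join ":" L2) : L1 = L2 := by
  have := pvSplit_join L1 hn1 h1
  rw [h, pvSplit_join L2 hn2 h2] at this
  exact this.symm

theorem pvNormalize_join (L : List String) (hL : L ≠ []) (hg : ∀ s ∈ L, pvGood s) :
    pvNormalize (PySem.Str.join ":" L) = PySem.Str.join ":" L := by
  have hsegs : pvSegs (PySem.Str.join ":" L) = L := by
    rw [pvSegs, pvSplit_join L hL (fun s hs => ⟨(hg s hs).1, (hg s hs).2.1⟩)]
    rw [List.filter_eq_self.mpr, List.map_congr_left, List.map_id]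
    · intro s hs
      exact (hg s hs).2.2
    · intro s hs
      rw [(hg s hs).2.2]
      simp
      intro h0
      exact (hg s hs).1 (by rw [h0]; rfl)
  rw [show pvNormalize (PySem.Str.join ":" L)
      = if pvSegs (PySem.Str.join ":" L) = [] then "" else PySem.Str.join ":" (pvSegs (PySem.Str.join ":" L)) from rfl]
  rw [hsegs, if_neg hL]

theorem pvKey_eq_join (value : String) :
    pvKey value = PySem.Str.join ":" (pvKeySegments value) := by
  rw [pvKey, pvKeySegments_eq]
  by_cases h : pvSegs value = []
  · rw [pvNormalize_eq_empty value h, h]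
    rfl
  · rw [pvNormalize_eq_join value h, pvLower_join]

theorem pvGood_lower (s : String) (h : pvGood s) :
    (PySem.Str.lower s).toList ≠ [] ∧ ':' ∉ (PySem.Str.lower s).toList := by
  have hl : (PySem.Str.lower s).toList = s.toList.map PySem.Chars.lowerChar := by
    simp [PySem.Str.lower, PySem.Chars.lower, String.toList_ofList]
  rw [hl]
  refine ⟨by simpa using h.1, ?_⟩
  intro hc
  obtain ⟨c, hcm, hceq⟩ := List.mem_map.mp hc
  rw [pvLowerChar_eq_colon_iff] at hceq
  exact h.2.1 (hceq ▸ hcm)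

theorem pvPathPrefixes_eq (value : String) (h : pvSegs value ≠ []) :
    pvPathPrefixes value = (List.range (pvSegs value).length).map
      (fun k => PySem.Str.join ":" ((pvSegs value).take (k + 1))) := by
  have hgood := pvSegs_good value
  have hclean : pvNormalize value = PySem.Str.join ":" (pvSegs value) := pvNormalize_eq_join value h
  have hne : pvNormalize value ≠ "" := by
    rw [hclean]; exact pvJoin_ne_empty _ h (fun s hs => (hgood s hs).1)
  rw [show pvPathPrefixes value = (if pvNormalize value = "" then [] else
      (PySem.List.pyRange 0 ((((PySem.Str.split? (pvNormalize value) ":").getD []).length : Int)) 1).foldl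
      (fun prefixes index =>
        prefixes ++ [PySem.Str.join ":" (PySem.List.slice ((PySem.Str.split? (pvNormalize value) ":").getD []) none (some (index + 1)))]) []) from rfl]
  rw [if_neg hne, hclean, pvSplit_join _ h (fun s hs => ⟨(hgood s hs).1, (hgood s hs).2.1⟩)]
  rw [PySem.List.pyRange_zero_nat, PySem.List.foldl_append_singleton_eq_map]
  simp only [List.nil_append, List.map_map, Function.comp_def]
  apply List.map_congr_left
  intro k hk
  rw [PySem.List.slice_to _ (by omega), show (((k : Int)) + 1).toNat = k + 1 by omega]

theorem pvKey_join_take (L : List String) (hg : ∀ s ∈ L, pvGood s) (k : Nat)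
    (hk : k < L.length) :
    pvKey (PySem.Str.join ":" (L.take (k + 1)))
      = PySem.Str.join ":" ((L.map PySem.Str.lower).take (k + 1)) := by
  have htne : L.take (k + 1) ≠ [] := by
    intro h0
    rcases List.take_eq_nil_iff.mp h0 with h1 | h1
    · omega
    · rw [h1] at hk; simp at hk
  have htg : ∀ s ∈ L.take (k + 1), pvGood s := fun s hs => hg s (List.mem_of_mem_take hs)
  rw [pvKey, pvNormalize_join _ htne htg, pvLower_join, List.map_take]

theorem pvContains_iff (source : String) (msegs : List String)
    (hm : msegs ≠ []) (hmg : ∀ s ∈ msegs, s.toList ≠ [] ∧ ':' ∉ s.toList) :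
    PySem.Set.contains (PySem.Set.ofList ((pvPathPrefixes source).map pvKey))
        (PySem.Str.join ":" msegs) = ((pvKeySegments source).take msegs.length == msegs) := by
  have hmem : ∀ (xs : List String) (y : String),
      PySem.Set.contains (PySem.Set.ofList xs) y = decide (y ∈ xs) := by
    intro xs y
    rw [PySem.Set.contains]
    rcases h : xs.contains y with _ | _
    · simp at h
      have : ¬ y ∈ PySem.Set.ofList xs := fun hmem => h ((PySem.Set.mem_ofList xs y).mp hmem)
      simp [this, h]
    · simp at h
      have : y ∈ PySem.Set.ofList xs := (PySem.Set.mem_ofList xs y).mpr h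
      simp [this, h]
  rw [hmem]
  rcases hcase : pvSegs source with _ | ⟨a, as⟩
  · -- no segments: no prefixes, and key segments empty
    have hpref : pvPathPrefixes source = [] := by
      rw [show pvPathPrefixes source = (if pvNormalize source = "" then [] else
        (PySem.List.pyRange 0 ((((PySem.Str.split? (pvNormalize source) ":").getD []).length : Int)) 1).foldl
        (fun prefixes index =>
          prefixes ++ [PySem.Str.join ":" (PySem.List.slice ((PySem.Str.split? (pvNormalize source) ":").getD []) none (some (index + 1)))]) []) from rfl]
      rw [if_pos (pvNormalize_eq_empty source hcase)]
    have hks : pvKeySegments source = [] := by rw [pvKeySegments_eq, hcase, List.map_nil]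
    rw [hpref, hks]
    simp only [List.map_nil, List.take_nil, List.not_mem_nil, decide_false]
    rcases h : (([] : List String) == msegs) with _ | _
    · rfl
    · simp at h; exact absurd h hm
  · have hsne : pvSegs source ≠ [] := by rw [hcase]; simp
    have hgood := pvSegs_good source
    have hlg : ∀ s ∈ (pvSegs source).map PySem.Str.lower, s.toList ≠ [] ∧ ':' ∉ s.toList := by
      intro s hs
      obtain ⟨t, ht, rfl⟩ := List.mem_map.mp hs
      exact pvGood_lower t (hgood t ht)
    rw [pvPathPrefixes_eq source hsne, List.map_map]
    have hmape : (List.range (pvSegs source).length).map (pvKey ∘ fun k => PySem.Str.join ":" ((pvSegs source).take (k + 1)))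
        = (List.range (pvSegs source).length).map (fun k => PySem.Str.join ":" (((pvSegs source).map PySem.Str.lower).take (k + 1))) := by
      apply List.map_congr_left
      intro k hk
      simp only [Function.comp_apply]
      rw [pvKey_join_take (pvSegs source) hgood k (List.mem_range.mp hk)]
    rw [hmape, pvKeySegments_eq]
    have key : (PySem.Str.join ":" msegs ∈ (List.range (pvSegs source).length).map
          (fun k => PySem.Str.join ":" (((pvSegs source).map PySem.Str.lower).take (k + 1))))
        ↔ ((pvSegs source).map PySem.Str.lower).take msegs.length = msegs := by
      constructor
      · intro hmem'
        obtain ⟨k, hk, heq⟩ := List.mem_map.mp hmem'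
        rw [List.mem_range] at hk
        have htne : ((pvSegs source).map PySem.Str.lower).take (k + 1) ≠ [] := by
          intro h0
          rcases List.take_eq_nil_iff.mp h0 with h1 | h1
          · omega
          · rw [List.map_eq_nil_iff] at h1; exact hsne h1
        have htg : ∀ s ∈ ((pvSegs source).map PySem.Str.lower).take (k + 1), s.toList ≠ [] ∧ ':' ∉ s.toList :=
          fun s hs => hlg s (List.mem_of_mem_take hs)
        have heq' : ((pvSegs source).map PySem.Str.lower).take (k + 1) = msegs := pvJoin_inj _ _ htg hmg htne hm heq
        have hml : msegs.length = k + 1 := by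
          have := congrArg List.length heq'
          simp at this
          omega
        rw [hml, heq']
      · intro htake
        have hml : msegs.length ≤ (pvSegs source).length := by
          have := congrArg List.length htake
          simp at this
          omega
        have hmpos : 0 < msegs.length := List.length_pos_iff.mpr hm
        apply List.mem_map.mpr
        refine ⟨msegs.length - 1, List.mem_range.mpr (by omega), ?_⟩
        rw [show msegs.length - 1 + 1 = msegs.length by omega, htake]
    rcases h : (((pvSegs source).map PySem.Str.lower).take msegs.length == msegs) with _ | _
    · simp at h
      simp [key, h]
    · simp at h
      simp [key, h]

theorem pvKeySegments_good (value : String) :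
    ∀ s ∈ pvKeySegments value, s.toList ≠ [] ∧ ':' ∉ s.toList := by
  intro s hs
  rw [pvKeySegments_eq] at hs
  obtain ⟨t, ht, rfl⟩ := List.mem_map.mp hs
  exact pvGood_lower t (pvSegs_good value t ht)

set_option maxHeartbeats 1000000 in
theorem pvLoop_eq (m : String) (d : PySem.Dict String String) (sources : List (String × String))
    (hm : pvKeySegments m ≠ []) :
    pvLoopA (pvKey m) d sources = pvLoopB (pvKeySegments m) d sources := by
  induction sources with
  | nil => rfl
  | cons st rest ih =>
    obtain ⟨field_name, account_type⟩ := st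
    rw [pvLoopA, pvLoopB]
    simp only [pvOptionalText]
    have hslice : PySem.List.slice (pvKeySegments (PySem.Str.strip (d.getD field_name "")))
        none (some ((pvKeySegments m).length : Int))
        = (pvKeySegments (PySem.Str.strip (d.getD field_name ""))).take (pvKeySegments m).length := by
      rw [PySem.List.slice_to _ (by omega), show (((pvKeySegments m).length : Int)).toNat = (pvKeySegments m).length by omega]
    have hcond : PySem.Set.contains (PySem.Set.ofList ((pvPathPrefixes (PySem.Str.strip (d.getD field_name ""))).map pvKey)) (pvKey m)
        = ((pvKeySegments (PySem.Str.strip (d.getD field_name ""))).take (pvKeySegments m).length == pvKeySegments m) := by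
      rw [pvKey_eq_join m]
      exact pvContains_iff _ _ hm (pvKeySegments_good m)
    by_cases hempty : PySem.Str.strip (d.getD field_name "") = ""
    · rw [if_pos hempty, ih]
      have hksrc : pvKeySegments (PySem.Str.strip (d.getD field_name "")) = [] := by
        rw [hempty]; rfl
      rw [if_neg]
      rw [hslice, hksrc, List.take_nil]
      simp only [beq_iff_eq]
      exact fun h => hm h.symm
    · rw [if_neg hempty]
      simp only [hcond, hslice]
      by_cases htest : (pvKeySegments (PySem.Str.strip (d.getD field_name ""))).take (pvKeySegments m).length = pvKeySegments m
      · rw [if_pos (by simpa using htest), if_pos (by simpa using htest)]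
      · rw [if_neg (by simpa using htest), if_neg (by simpa using htest), ih]

-- ===== VERDICT (by name: the statement is the Claim_ definition above) =====
theorem infer_account_type_for_missing_ref_py_spec : Claim_equal_infer_account_type_for_missing_ref_py := by
  intro m cs _
  unfold Spec_infer_account_type_for_missing_ref_py
  rw [infer_account_type_for_missing_ref_py, infer_account_type_for_missing_ref_py_alt]
  by_cases h : pvKeySegments m = []
  · have hk : pvKey m = "" := by rw [pvKey_eq_join, h]; rfl
    simp only [hk, h]
    simp
  · have hk : pvKey m ≠ "" := by
      rw [pvKey_eq_join]
      exact pvJoin_ne_empty _ h (fun s hs => (pvKeySegments_good m s hs).1)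
    simp only [if_neg hk, if_neg h]
    rw [pvLoop_eq m _ _ h, pvKey_eq_join m]
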